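-- pv_equiv track=rewrite | github.com/ujwal-yadav/Python-Questions | nearest greater palindrome no.py | checkPalin
-- ===== SOURCE A (Python) =====
-- def checkPalin(num):
--     num2=str(num);
--     mid=len(num2)//2;
--     if len(num2)%2==0:
--         if num2[mid]>num2[mid-1]:
--             temp=(int(num2)//100)+1;
--             temp=temp*100;
--             return checkPalin(temp);
--         else:
--             numleft=num2[:mid]
--             nxt=numleft+numleft[::-1]
--             return int(nxt)
--     else:
--         if num2[mid+1]>num2[mid-1]:
--             temp=(int(num2)//100)+1;
--             temp=temp*100;
--             return checkPalin(temp);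
--         else:
--             numleft=num2[:mid]
--             nxt=num2[:mid+1]+numleft[::-1]
--             return int(nxt);
-- ===== SOURCE B (Python) =====
-- def checkPalin(num):
--     # Iterative digit-arithmetic rewrite: no str() conversions; extracts the
--     # digit list once per round and rebuilds the result by positional arithmetic.
--     while True:
--         ds = _digits(num)
--         n = len(ds)
--         mid = n // 2
--         probe = ds[mid] if n % 2 == 0 else ds[mid + 1]
--         if probe > ds[mid - 1]:
--             num = (num // 100 + 1) * 100
--             continue
--         left = ds[:mid]
--         core = left if n % 2 == 0 else ds[:mid + 1]
--         return _value(core + left[::-1])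
--
--
-- def _digits(num):
--     ds = []
--     while num > 0:
--         ds.append(num % 10)
--         num //= 10
--     ds.reverse()
--     return ds
--
--
-- def _value(ds):
--     v = 0
--     for d in ds:
--         v = v * 10 + d
--     return v
-- ===== Notes on version B (the rewrite author's own statement) =====
-- stated objective: alternative
-- what changed: Replaces A's recursive string-slicing (str/indexing/slice concatenation/int round-trips) with an iterative while-loop that extracts the digit list by divmod arithmetic, compares digits as integers, and rebuilds the palindrome value positionally without any string conversion.
import Mathlib
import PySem

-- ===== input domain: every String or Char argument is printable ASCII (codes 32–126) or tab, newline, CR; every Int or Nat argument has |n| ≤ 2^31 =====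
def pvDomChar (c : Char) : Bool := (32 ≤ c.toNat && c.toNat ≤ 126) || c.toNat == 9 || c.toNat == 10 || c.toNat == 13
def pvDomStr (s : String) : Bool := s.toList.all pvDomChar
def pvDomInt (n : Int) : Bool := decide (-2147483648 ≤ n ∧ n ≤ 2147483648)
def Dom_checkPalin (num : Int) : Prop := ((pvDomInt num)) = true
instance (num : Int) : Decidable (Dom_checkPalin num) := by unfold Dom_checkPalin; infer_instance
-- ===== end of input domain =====

-- B replaces A's string-slicing tail recursion by an iterative digit-arithmetic loop; return values agree on Pre_.

-- ===== PORT A =====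
-- int(s) ported by hand for the nonempty all-digit strings that reach it in this
-- function (exact there: on such strings Python's int() is this left fold).
def pvParseDigits (cs : List Char) : Int :=
  cs.foldl (fun a c => a * 10 + ((c.toNat : Int) - 48)) 0

-- fuel-guarded transcription of A's tail recursion (the 0-fuel branch is a
-- totality guard only); Python's 's1 > s2' on one-char strings is 'c2 < c1'.
def checkPalinGo : Nat → Int → Int
  | 0, _ => 0
  | fuel+1, num =>
    let num2 := PySem.Int.toChars num
    let mid := PySem.Int.floordiv (PySem.List.len num2) 2
    if PySem.Int.mod (PySem.List.len num2) 2 = 0 then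
      if PySem.List.pyGetD num2 (mid - 1) ' ' < PySem.List.pyGetD num2 mid ' ' then
        checkPalinGo fuel ((PySem.Int.floordiv (pvParseDigits num2) 100 + 1) * 100)
      else
        let numleft := PySem.List.slice num2 none (some mid)
        pvParseDigits (numleft ++ ((PySem.List.slice? numleft none none (-1)).getD []))
    else
      if PySem.List.pyGetD num2 (mid - 1) ' ' < PySem.List.pyGetD num2 (mid + 1) ' ' then
        checkPalinGo fuel ((PySem.Int.floordiv (pvParseDigits num2) 100 + 1) * 100)
      else
        let numleft := PySem.List.slice num2 none (some mid)
        pvParseDigits (PySem.List.slice num2 none (some (mid + 1)) ++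
          ((PySem.List.slice? numleft none none (-1)).getD []))

def checkPalin (num : Int) : Int := checkPalinGo 2048 num

-- ===== PORT B =====
-- _digits: while num > 0: ds.append(num % 10); num //= 10 — fuel-guarded loop
-- (64 iterations cover every integer this file claims anything about).
def pvDigitsGo : Nat → Int → List Int → List Int
  | 0, _, acc => acc
  | f+1, num, acc =>
    if 0 < num then pvDigitsGo f (PySem.Int.floordiv num 10) (acc ++ [PySem.Int.mod num 10])
    else acc

def pvDigits (num : Int) : List Int := (pvDigitsGo 64 num []).reverse

-- _value: v = 0; for d in ds: v = v*10 + d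
def pvValue (ds : List Int) : Int := ds.foldl (fun v d => v * 10 + d) 0

-- the while-True loop of B, fuel-guarded like A's recursion
def checkPalinAltGo : Nat → Int → Int
  | 0, _ => 0
  | fuel+1, num =>
    let ds := pvDigits num
    let n := PySem.List.len ds
    let mid := PySem.Int.floordiv n 2
    let probe := if PySem.Int.mod n 2 = 0 then PySem.List.pyGetD ds mid 0
                 else PySem.List.pyGetD ds (mid + 1) 0
    if probe > PySem.List.pyGetD ds (mid - 1) 0 then
      checkPalinAltGo fuel ((PySem.Int.floordiv num 100 + 1) * 100)
    else
      let left := PySem.List.slice ds none (some mid)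
      let core := if PySem.Int.mod n 2 = 0 then left else PySem.List.slice ds none (some (mid + 1))
      pvValue (core ++ ((PySem.List.slice? left none none (-1)).getD []))

def checkPalin_alt (num : Int) : Int := checkPalinAltGo 2048 num

-- ===== PRECONDITION & SPEC =====
-- Pre_ excludes exactly the inputs on which A raises: every num < 10 ends in an
-- IndexError (single digits, 0, and every negative after its bump chain) or a
-- ValueError (int() applied to a string still containing '-').
def Pre_checkPalin (num : Int) : Prop := 10 ≤ num
instance (num : Int) : Decidable (Pre_checkPalin num) := by unfold Pre_checkPalin; infer_instance
def pvWitness_checkPalin : Int := 10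

def Spec_checkPalin (num : Int) (out : Int) : Prop := out = checkPalin_alt num
instance (num : Int) (out : Int) : Decidable (Spec_checkPalin num out) := by unfold Spec_checkPalin; infer_instance

-- ===== CLAIM (what is proved, stated in full; the proofs are below) =====
def Claim_equal_checkPalin : Prop := ∀ (num : Int), Dom_checkPalin num → Pre_checkPalin num → Spec_checkPalin num (checkPalin num)

-- ===== LEMMAS AND PROOFS =====

-- most-significant-first digit list of a natural number (proof-side device)
def natDigits (n : Nat) : List Nat :=
  if _h : n < 10 then [n] else natDigits (n / 10) ++ [n % 10]
  termination_by n
  decreasing_by exact Nat.div_lt_self (by omega) (by omega)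

lemma natDigits_ne_nil (n : Nat) : natDigits n ≠ [] := by
  unfold natDigits; split <;> simp

lemma natDigits_lt_ten (n : Nat) : ∀ d ∈ natDigits n, d < 10 := by
  induction n using Nat.strong_induction_on with
  | _ n ih =>
    unfold natDigits; split
    · next h => intro d hd; simp at hd; omega
    · intro d hd
      rcases List.mem_append.mp hd with h | h
      · exact ih (n / 10) (Nat.div_lt_self (by omega) (by omega)) d h
      · simp at h; omega

lemma natDigits_len_two {n : Nat} (h : 10 ≤ n) : 2 ≤ (natDigits n).length := by
  unfold natDigits
  rw [dif_neg (by omega)]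
  have h1 : natDigits (n / 10) ≠ [] := natDigits_ne_nil (n / 10)
  have h2 : 1 ≤ (natDigits (n / 10)).length := by
    cases h' : natDigits (n / 10) <;> simp_all
  simp only [List.length_append, List.length_cons, List.length_nil]
  omega

-- the fold A and B both perform inverts natDigits
lemma natDigits_foldl (n : Nat) : ∀ (a : Int),
    (natDigits n).foldl (fun (v : Int) (d : Nat) => v * 10 + (d : Int)) a
      = a * 10 ^ (natDigits n).length + n := by
  induction n using Nat.strong_induction_on with
  | _ n ih =>
    intro a
    unfold natDigits; split
    · simp
    · rw [List.foldl_append, ih (n / 10) (Nat.div_lt_self (by omega) (by omega))]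
      simp only [List.foldl_cons, List.foldl_nil, List.length_append, List.length_cons,
        List.length_nil, pow_succ]
      have hsplit : ((n / 10 : Nat) : Int) * 10 + ((n % 10 : Nat) : Int) = (n : Int) := by omega
      linear_combination hsplit

lemma toDigitsCore_eq (f : Nat) : ∀ (n : Nat) (l : List Char), n < f →
    Nat.toDigitsCore 10 f n l = (natDigits n).map Nat.digitChar ++ l := by
  induction f with
  | zero => intro n l h; omega
  | succ f ih =>
    intro n l h
    rw [Nat.toDigitsCore]
    by_cases h10 : n < 10
    · have hz : n / 10 = 0 := by omega
      simp only [hz]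
      unfold natDigits
      rw [dif_pos h10]
      simp [Nat.mod_eq_of_lt h10]
    · have hne : n / 10 ≠ 0 := by omega
      simp only [if_neg hne]
      rw [ih (n / 10) _ (by omega)]
      conv_rhs => rw [natDigits, dif_neg h10]
      simp

lemma toChars_eq {num : Int} (h : 0 < num) :
    PySem.Int.toChars num = (natDigits num.toNat).map Nat.digitChar := by
  rw [PySem.Int.toChars]
  rw [if_neg (by omega)]
  rw [Nat.toDigits]
  rw [toDigitsCore_eq (num.toNat + 1) num.toNat [] (by omega)]
  simp

lemma pvDigitsGo_zero (f : Nat) (acc : List Int) : pvDigitsGo f 0 acc = acc := by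
  cases f <;> simp [pvDigitsGo]

lemma pvDigitsGo_eq (f : Nat) : ∀ (num : Int) (acc : List Int), 0 < num → num.toNat < 10 ^ f →
    pvDigitsGo f num acc
      = acc ++ ((natDigits num.toNat).map (fun d : Nat => (d : Int))).reverse := by
  induction f with
  | zero => intro num acc h hb; simp at hb; omega
  | succ f ih =>
    intro num acc h hb
    rw [pvDigitsGo, if_pos h]
    rw [PySem.Int.floordiv_eq_ediv_of_pos (by omega : (0:Int) < 10)]
    rw [PySem.Int.mod_eq_emod_of_pos (by omega : (0:Int) < 10)]
    by_cases h10 : num < 10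
    · have hz : num / 10 = 0 := by omega
      rw [hz, pvDigitsGo_zero]
      conv_rhs => rw [natDigits]
      rw [dif_pos (by omega)]
      have : num % 10 = ((num.toNat : Int)) := by omega
      simp [this]
    · have hpos : 0 < num / 10 := by omega
      have hbb : (num / 10).toNat < 10 ^ f := by
        have hp : (num / 10).toNat = num.toNat / 10 := by omega
        have hs : (10:Nat) ^ (f+1) = 10 ^ f * 10 := by ring
        rw [hs] at hb
        rw [hp]
        omega
      rw [ih (num / 10) (acc ++ [num % 10]) hpos hbb]
      conv_rhs => rw [natDigits]
      rw [dif_neg (by omega)]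
      have hp : (num / 10).toNat = num.toNat / 10 := by omega
      have hm : num % 10 = ((num.toNat % 10 : Nat) : Int) := by omega
      simp [hp, hm]

lemma pvDigits_eq {num : Int} (h : 0 < num) (hb : num ≤ 10 ^ 15) :
    pvDigits num = (natDigits num.toNat).map (fun d : Nat => (d : Int)) := by
  rw [pvDigits, pvDigitsGo_eq 64 num [] h (by omega)]
  simp

lemma digitChar_toNat {d : Nat} (h : d < 10) : (Nat.digitChar d).toNat = 48 + d := by
  interval_cases d <;> decide

lemma digitChar_lt_iff {a b : Nat} (ha : a < 10) (hb : b < 10) :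
    (Nat.digitChar a < Nat.digitChar b) ↔ a < b := by
  interval_cases a <;> interval_cases b <;> decide

lemma parse_eq_value {X : List Nat} (h : ∀ d ∈ X, d < 10) :
    pvParseDigits (X.map Nat.digitChar) = pvValue (X.map (fun d : Nat => (d : Int))) := by
  rw [pvParseDigits, pvValue, List.foldl_map, List.foldl_map]
  apply PySem.List.foldl_congr_mem
  intro a x hx
  rw [digitChar_toNat (h x hx)]
  push_cast
  ring

lemma parse_toChars {num : Int} (h : 0 < num) :
    pvParseDigits (PySem.Int.toChars num) = num := by
  rw [toChars_eq h, pvParseDigits, List.foldl_map]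
  have hcongr : (natDigits num.toNat).foldl
        (fun (a : Int) (d : Nat) => a * 10 + (((Nat.digitChar d).toNat : Int) - 48)) 0
      = (natDigits num.toNat).foldl (fun (v : Int) (d : Nat) => v * 10 + (d : Int)) 0 := by
    apply PySem.List.foldl_congr_mem
    intro a x hx
    rw [digitChar_toNat (natDigits_lt_ten _ x hx)]
    push_cast; ring
  rw [hcongr, natDigits_foldl]
  simp
  omega

lemma pyGetD_map_nat {α : Type} (f : Nat → α) (L : List Nat) (m : Nat) (hm : m < L.length) (d : α) :
    PySem.List.pyGetD (L.map f) (m : Int) d = f (L[m]) := by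
  simp [PySem.List.pyGetD_natCast, hm]

-- the common return value of the two non-recursive branches
lemma ret_eq {L : List Nat} (hLd : ∀ d ∈ L, d < 10) (a b : Nat) :
    pvParseDigits ((L.map Nat.digitChar).take a ++ ((L.map Nat.digitChar).take b).reverse)
      = pvValue ((L.map (fun d : Nat => (d : Int))).take a ++
          ((L.map (fun d : Nat => (d : Int))).take b).reverse) := by
  rw [← List.map_take, ← List.map_take, ← List.map_take, ← List.map_take,
    ← List.map_reverse, ← List.map_reverse, ← List.map_append, ← List.map_append]
  apply parse_eq_value
  intro d hd
  rcases List.mem_append.mp hd with h | h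
  · exact hLd d (List.mem_of_mem_take h)
  · exact hLd d (List.mem_of_mem_take (List.mem_reverse.mp h))

lemma go_eq (fuel : Nat) : ∀ (num : Int), 10 ≤ num → num + 100 * fuel ≤ 10 ^ 15 →
    checkPalinGo fuel num = checkPalinAltGo fuel num := by
  induction fuel with
  | zero => intro num _ _; rfl
  | succ fuel ih =>
    intro num h hb
    have hpos : (0:Int) < num := by omega
    have hN : (10:Nat) ≤ num.toNat := by omega
    have hA : PySem.Int.toChars num = (natDigits num.toNat).map Nat.digitChar := toChars_eq hpos
    have hB : pvDigits num = (natDigits num.toNat).map (fun d : Nat => (d : Int)) :=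
      pvDigits_eq hpos (by omega)
    set L := natDigits num.toNat with hLdef
    have hLd : ∀ d ∈ L, d < 10 := natDigits_lt_ten _
    have hk2 : 2 ≤ L.length := natDigits_len_two hN
    set k := L.length with hkdef
    -- the common bump argument and its bounds
    have hbump1 : (10:Int) ≤ (PySem.Int.floordiv num 100 + 1) * 100 := by
      rw [PySem.Int.floordiv_eq_ediv_of_pos (by omega : (0:Int) < 100)]
      omega
    have hbump2 : (PySem.Int.floordiv num 100 + 1) * 100 + 100 * fuel ≤ 10 ^ 15 := by
      rw [PySem.Int.floordiv_eq_ediv_of_pos (by omega : (0:Int) < 100)]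
      omega
    rw [checkPalinGo, checkPalinAltGo]
    simp only [hA, hB]
    rw [← hA, parse_toChars hpos, hA]
    simp only [PySem.List.len_eq, List.length_map, ← hkdef]
    rw [PySem.Int.floordiv_eq_ediv_of_pos (by omega : (0:Int) < 2)]
    rw [PySem.Int.mod_eq_emod_of_pos (by omega : (0:Int) < 2)]
    set m := k / 2 with hmdef
    have hmidc : ((k:Int)) / 2 = ((m : Nat) : Int) := by omega
    rw [hmidc]
    have hm1 : 1 ≤ m := by omega
    have hmlt : m < k := by omega
    have hcast1 : ((m:Int) - 1) = (((m - 1 : Nat)) : Int) := by omega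
    have hm1lt : m - 1 < k := by omega
    by_cases hpar : (k:Int) % 2 = 0
    · -- even length
      rw [if_pos hpar, if_pos hpar, if_pos hpar]
      rw [hcast1]
      rw [pyGetD_map_nat Nat.digitChar L (m-1) (by omega), pyGetD_map_nat Nat.digitChar L m (by omega)]
      rw [pyGetD_map_nat (fun d : Nat => (d : Int)) L (m-1) (by omega),
          pyGetD_map_nat (fun d : Nat => (d : Int)) L m (by omega)]
      have hcond : (Nat.digitChar L[m-1] < Nat.digitChar L[m])
          ↔ ((L[m] : Int) > (L[m-1] : Int)) := by
        rw [digitChar_lt_iff (hLd _ (List.getElem_mem _)) (hLd _ (List.getElem_mem _))]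
        omega
      by_cases hc : Nat.digitChar L[m-1] < Nat.digitChar L[m]
      · rw [if_pos hc, if_pos (hcond.mp hc)]
        exact ih _ hbump1 hbump2
      · rw [if_neg hc, if_neg (fun hcc => hc (hcond.mpr hcc))]
        simp only [PySem.List.slice?_none_none_neg_one, Option.getD_some,
          PySem.List.slice_to_natCast]
        exact ret_eq hLd m m
    · -- odd length
      rw [if_neg hpar, if_neg hpar, if_neg hpar]
      have hk3 : 3 ≤ k := by omega
      have hmp1lt : m + 1 < k := by omega
      have hcast2 : ((m:Int) + 1) = (((m + 1 : Nat)) : Int) := by push_cast; ring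
      rw [hcast1, hcast2]
      rw [pyGetD_map_nat Nat.digitChar L (m-1) (by omega), pyGetD_map_nat Nat.digitChar L (m+1) (by omega)]
      rw [pyGetD_map_nat (fun d : Nat => (d : Int)) L (m-1) (by omega),
          pyGetD_map_nat (fun d : Nat => (d : Int)) L (m+1) (by omega)]
      have hcond : (Nat.digitChar L[m-1] < Nat.digitChar L[m+1])
          ↔ ((L[m+1] : Int) > (L[m-1] : Int)) := by
        rw [digitChar_lt_iff (hLd _ (List.getElem_mem _)) (hLd _ (List.getElem_mem _))]
        omega
      by_cases hc : Nat.digitChar L[m-1] < Nat.digitChar L[m+1]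
      · rw [if_pos hc, if_pos (hcond.mp hc)]
        exact ih _ hbump1 hbump2
      · rw [if_neg hc, if_neg (fun hcc => hc (hcond.mpr hcc))]
        simp only [PySem.List.slice?_none_none_neg_one, Option.getD_some,
          PySem.List.slice_to_natCast]
        exact ret_eq hLd (m+1) m

-- ===== VERDICT (by name: the statement is the Claim_ definition above) =====
theorem checkPalin_spec : Claim_equal_checkPalin := by
  intro num hdom hpre
  unfold Spec_checkPalin checkPalin checkPalin_alt
  apply go_eq
  · exact hpre
  · unfold Dom_checkPalin pvDomInt at hdom
    simp at hdom
    omega
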